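-- pv_equiv track=rewrite | github.com/lbh848/comfyui_hooking_server | customprompt/enhance_outfit_prompt_v9.py | _extract_color_from_phrase
-- ===== SOURCE A (Python) =====
-- _ALL_COLORS = frozenset({
--     'aqua', 'beige', 'black', 'blue', 'brown', 'burgundy', 'charcoal',
--     'coral', 'cream', 'crimson', 'cyan', 'gold', 'golden', 'grey', 'gray',
--     'green', 'indigo', 'ivory', 'khaki', 'lavender', 'lime', 'magenta',
--     'maroon', 'navy', 'olive', 'orange', 'pink', 'plum', 'purple', 'red',
--     'rose', 'salmon', 'silver', 'teal', 'turquoise', 'violet', 'white',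
--     'yellow',
-- })
--
-- _COLOR_MODS = frozenset({
--     'pastel', 'dark', 'light', 'bright', 'deep', 'pale', 'warm', 'cool',
-- })
--
-- def _extract_color_from_phrase(phrase: str) -> str | None:
--     """Extract color phrase from text like 'pastel pink blouse' → 'pastel pink'."""
--     words = phrase.split()
--     color_parts = []
--     i = 0
--     while i < len(words):
--         w = words[i].lower().rstrip(',.')
--         if w in _COLOR_MODS:
--             color_parts.append(words[i])
--             i += 1
--         elif w in _ALL_COLORS:
--             color_parts.append(words[i])
--             break
--         else:
--             break
--     return ' '.join(color_parts) if color_parts else None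
-- ===== SOURCE B (Python) =====
-- _ALL_COLORS = frozenset({
--     'aqua', 'beige', 'black', 'blue', 'brown', 'burgundy', 'charcoal',
--     'coral', 'cream', 'crimson', 'cyan', 'gold', 'golden', 'grey', 'gray',
--     'green', 'indigo', 'ivory', 'khaki', 'lavender', 'lime', 'magenta',
--     'maroon', 'navy', 'olive', 'orange', 'pink', 'plum', 'purple', 'red',
--     'rose', 'salmon', 'silver', 'teal', 'turquoise', 'violet', 'white',
--     'yellow',
-- })
--
-- _COLOR_MODS = frozenset({
--     'pastel', 'dark', 'light', 'bright', 'deep', 'pale', 'warm', 'cool',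
-- })
--
-- _COLOR_WORDS = _COLOR_MODS | _ALL_COLORS
--
--
-- def _norm(w):
--     return w.lower().rstrip(',.')
--
--
-- def _valid_prefix(words, k):
--     """words[:k] is a color phrase: modifiers followed by one final modifier-or-color."""
--     return (all(_norm(w) in _COLOR_MODS for w in words[:k - 1])
--             and _norm(words[k - 1]) in _COLOR_WORDS)
--
--
-- def _extract_color_from_phrase(phrase):
--     """Brute force: try every candidate prefix length, longest first."""
--     words = phrase.split()
--     for k in range(len(words), 0, -1):
--         if _valid_prefix(words, k):
--             return ' '.join(words[:k])
--     return None
-- ===== Notes on version B (the rewrite author's own statement) =====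
-- stated objective: alternative
-- what changed: Replaced A's single forward while-loop state machine by a generate-and-test search: try every candidate prefix length from longest to shortest, re-validating each candidate prefix from scratch (all-but-last words are modifiers, last is a modifier or color), and return the first valid one.
import Mathlib
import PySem

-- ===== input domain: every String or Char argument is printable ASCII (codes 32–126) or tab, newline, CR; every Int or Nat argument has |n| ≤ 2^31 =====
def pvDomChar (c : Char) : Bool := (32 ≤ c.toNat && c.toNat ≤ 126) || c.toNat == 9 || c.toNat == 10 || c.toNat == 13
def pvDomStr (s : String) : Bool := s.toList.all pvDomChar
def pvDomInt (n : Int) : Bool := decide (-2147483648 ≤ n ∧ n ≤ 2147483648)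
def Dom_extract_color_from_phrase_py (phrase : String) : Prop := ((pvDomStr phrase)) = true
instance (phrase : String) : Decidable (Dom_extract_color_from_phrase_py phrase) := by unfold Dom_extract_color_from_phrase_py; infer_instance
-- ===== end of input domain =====

-- B replaces A's forward state-machine scan by a brute-force search over candidate
-- prefix lengths, longest first, each re-validated from scratch (objective: alternative).

-- shared module-level constants (_ALL_COLORS, _COLOR_MODS) and the w.lower().rstrip(',.') normalization
def pvColors : List (List Char) :=
  ["aqua", "beige", "black", "blue", "brown", "burgundy", "charcoal",
   "coral", "cream", "crimson", "cyan", "gold", "golden", "grey", "gray",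
   "green", "indigo", "ivory", "khaki", "lavender", "lime", "magenta",
   "maroon", "navy", "olive", "orange", "pink", "plum", "purple", "red",
   "rose", "salmon", "silver", "teal", "turquoise", "violet", "white",
   "yellow"].map String.toList

def pvMods : List (List Char) :=
  ["pastel", "dark", "light", "bright", "deep", "pale", "warm", "cool"].map String.toList

-- w.rstrip(',.'): drop trailing ',' and '.' — exact hand port of str.rstrip with a chars argument
def pvRstripCD (cs : List Char) : List Char :=
  ((cs.reverse.dropWhile (fun c => c == ',' || c == '.'))).reverse

-- w.lower().rstrip(',.')
def pvNorm (w : List Char) : List Char := pvRstripCD (PySem.Chars.lower w)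

-- ===== PORT A =====
-- the while loop with its accumulator color_parts and explicit break cases
def pvLoopA (acc : List (List Char)) : List (List Char) → List (List Char)
  | [] => acc
  | w :: rest =>
    let n := pvNorm w
    if pvMods.contains n then pvLoopA (acc ++ [w]) rest
    else if pvColors.contains n then acc ++ [w]
    else acc

def extract_color_from_phrase_py (phrase : String) : Option String :=
  let words := PySem.Chars.split₀ phrase.toList
  let parts := pvLoopA [] words
  if parts.isEmpty then none else some (String.ofList (PySem.Chars.join [' '] parts))

-- ===== PORT B =====
-- _COLOR_WORDS = _COLOR_MODS | _ALL_COLORS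
def pvColorWords : List (List Char) := pvMods ++ pvColors

-- _valid_prefix(words, k): words[:k-1] are all modifiers and words[k-1] is a color word
def pvValidPrefix (words : List (List Char)) (k : Nat) : Bool :=
  (words.take (k - 1)).all (fun w => pvMods.contains (pvNorm w)) &&
  (match words[k - 1]? with
   | some w => pvColorWords.contains (pvNorm w)
   | none => false)

-- for k in range(len(words), 0, -1): first valid k wins
def pvSearchB (words : List (List Char)) : Nat → Option (List (List Char))
  | 0 => none
  | k + 1 => if pvValidPrefix words (k + 1) then some (words.take (k + 1)) else pvSearchB words k

def extract_color_from_phrase_py_alt (phrase : String) : Option String :=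
  let words := PySem.Chars.split₀ phrase.toList
  match pvSearchB words words.length with
  | some parts => some (String.ofList (PySem.Chars.join [' '] parts))
  | none => none

-- ===== PRECONDITION & SPEC =====
def Spec_extract_color_from_phrase_py (phrase : String) (out : Option String) : Prop := out = extract_color_from_phrase_py_alt phrase
instance (phrase : String) (out : Option String) : Decidable (Spec_extract_color_from_phrase_py phrase out) := by unfold Spec_extract_color_from_phrase_py; infer_instance

-- ===== CLAIM (what is proved, stated in full; the proofs are below) =====
def Claim_equal_extract_color_from_phrase_py : Prop := ∀ (phrase : String), Dom_extract_color_from_phrase_py phrase → Spec_extract_color_from_phrase_py phrase (extract_color_from_phrase_py phrase)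

-- ===== LEMMAS AND PROOFS =====

lemma pvLoopA_cons (acc : List (List Char)) (w : List Char) (rest : List (List Char)) :
    pvLoopA acc (w :: rest) =
      if pvNorm w ∈ pvMods then pvLoopA (acc ++ [w]) rest
      else if pvNorm w ∈ pvColors then acc ++ [w] else acc := by
  simp only [pvLoopA, List.contains_eq_mem, decide_eq_true_eq]

lemma pvLoopA_acc (ws : List (List Char)) : ∀ acc, pvLoopA acc ws = acc ++ pvLoopA [] ws := by
  induction ws with
  | nil => intro acc; simp [pvLoopA]
  | cons w rest ih =>
    intro acc
    rw [pvLoopA_cons, pvLoopA_cons]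
    by_cases hm : pvNorm w ∈ pvMods
    · rw [if_pos hm, if_pos hm, ih (acc ++ [w]), ih ([] ++ [w])]
      simp
    · by_cases hc : pvNorm w ∈ pvColors <;> simp [hm, hc]

lemma pvLoopA_cons_mod (w : List Char) (rest : List (List Char)) (hm : pvNorm w ∈ pvMods) :
    pvLoopA [] (w :: rest) = w :: pvLoopA [] rest := by
  rw [pvLoopA_cons, if_pos hm, pvLoopA_acc]
  simp

-- A's accumulated result is a prefix of the word list
lemma pvLoopA_prefix (ws : List (List Char)) :
    pvLoopA [] ws = ws.take (pvLoopA [] ws).length := by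
  induction ws with
  | nil => simp [pvLoopA]
  | cons w rest ih =>
    by_cases hm : pvNorm w ∈ pvMods
    · rw [pvLoopA_cons_mod w rest hm]
      simp only [List.length_cons, List.take_succ_cons]
      exact congrArg _ ih
    · rw [pvLoopA_cons, if_neg hm]
      by_cases hc : pvNorm w ∈ pvColors <;> simp [hc]

lemma pvValid_zero (w : List Char) (rest : List (List Char)) :
    pvValidPrefix (w :: rest) 1 = pvColorWords.contains (pvNorm w) := by
  simp [pvValidPrefix]

lemma pvValid_succ (w : List Char) (rest : List (List Char)) (j : ℕ) :
    pvValidPrefix (w :: rest) (j + 2) =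
      (decide (pvNorm w ∈ pvMods) && pvValidPrefix rest (j + 1)) := by
  simp [pvValidPrefix, List.take_succ_cons, Bool.and_assoc]

-- B's validity test holds exactly for prefix lengths up to A's result length
lemma pvValid_iff (ws : List (List Char)) (k : Nat) :
    pvValidPrefix ws (k + 1) = decide (k + 1 ≤ (pvLoopA [] ws).length) := by
  induction ws generalizing k with
  | nil => simp [pvValidPrefix, pvLoopA]
  | cons w rest ih =>
    by_cases hm : pvNorm w ∈ pvMods
    · rw [pvLoopA_cons_mod w rest hm]
      cases k with
      | zero => simp [pvValid_zero, pvColorWords, hm]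
      | succ j =>
        rw [pvValid_succ, ih j]
        simp only [hm, decide_true, Bool.true_and, List.length_cons]
        exact decide_eq_decide.mpr (by omega)
    · have hA : pvLoopA [] (w :: rest) = if pvNorm w ∈ pvColors then [w] else [] := by
        rw [pvLoopA_cons, if_neg hm]; simp
      by_cases hc : pvNorm w ∈ pvColors
      · rw [hA, if_pos hc]
        cases k with
        | zero => simp [pvValid_zero, pvColorWords, hc]
        | succ j => rw [pvValid_succ]; simp [hm]
      · rw [hA, if_neg hc]
        cases k with
        | zero => simp [pvValid_zero, pvColorWords, hm, hc]
        | succ j => rw [pvValid_succ]; simp [hm]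

lemma pvSearchB_eq (ws : List (List Char)) :
    ∀ n, (pvLoopA [] ws).length ≤ n →
      pvSearchB ws n = if (pvLoopA [] ws).isEmpty then none else some (pvLoopA [] ws) := by
  intro n
  induction n with
  | zero =>
    intro h
    have : pvLoopA [] ws = [] := List.eq_nil_of_length_eq_zero (Nat.le_zero.mp h)
    simp [pvSearchB, this]
  | succ n ih =>
    intro h
    by_cases hv : n + 1 ≤ (pvLoopA [] ws).length
    · have hL : (pvLoopA [] ws).length = n + 1 := le_antisymm h hv
      have hne : (pvLoopA [] ws).isEmpty = false := by
        cases e : pvLoopA [] ws with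
        | nil => rw [e] at hL; simp at hL
        | cons a t => simp
      rw [pvSearchB, pvValid_iff, decide_eq_true hv, if_pos rfl, hne]
      rw [← hL, ← pvLoopA_prefix]
      simp
    · rw [pvSearchB, pvValid_iff, decide_eq_false hv]
      simp only [Bool.false_eq_true, if_false]
      exact ih (by omega)

lemma pvLoopA_len_le (ws : List (List Char)) : (pvLoopA [] ws).length ≤ ws.length := by
  conv_lhs => rw [pvLoopA_prefix]
  simp

-- ===== VERDICT (by name: the statement is the Claim_ definition above) =====
theorem extract_color_from_phrase_py_spec : Claim_equal_extract_color_from_phrase_py := by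
  intro phrase _
  unfold Spec_extract_color_from_phrase_py extract_color_from_phrase_py extract_color_from_phrase_py_alt
  simp only [pvSearchB_eq _ _ (pvLoopA_len_le _)]
  cases h : pvLoopA [] (PySem.Chars.split₀ phrase.toList) <;> simp
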